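-- pv_equiv track=rewrite | github.com/fernandajacques/advent-of-code | 2021/Day06_P02.py | initialList
-- ===== SOURCE A (Python) =====
-- def initialList(ini_List):
--
--     fishList = [0,0,0,0,0,0,0,0,0]
--
--     for item in ini_List:
--         if item == 0:
--             fishList[0] +=1
--         elif item == 1:
--             fishList[1] +=1
--         elif item == 2:
--             fishList[2] +=1
--         elif item == 3:
--             fishList[3] +=1
--         elif item == 4:
--             fishList[4] +=1
--         elif item == 5:
--             fishList[5] +=1
--         elif item == 6:
--             fishList[6] +=1
--         elif item == 7:
--             fishList[7] +=1
--         elif item == 8: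
--             fishList[8] +=1
--
--     return fishList
-- ===== SOURCE B (Python) =====
-- def initialList(ini_List):
--     return [ini_List.count(i) for i in range(9)]
-- ===== Notes on version B (the rewrite author's own statement) =====
-- stated objective: idiomatic
-- what changed: Replaces A's single pass with a 9-way if/elif dispatch into a mutable histogram by nine per-bin list.count scans, one for each value 0-8, with no accumulator or histogram structure at all.
import Mathlib
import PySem

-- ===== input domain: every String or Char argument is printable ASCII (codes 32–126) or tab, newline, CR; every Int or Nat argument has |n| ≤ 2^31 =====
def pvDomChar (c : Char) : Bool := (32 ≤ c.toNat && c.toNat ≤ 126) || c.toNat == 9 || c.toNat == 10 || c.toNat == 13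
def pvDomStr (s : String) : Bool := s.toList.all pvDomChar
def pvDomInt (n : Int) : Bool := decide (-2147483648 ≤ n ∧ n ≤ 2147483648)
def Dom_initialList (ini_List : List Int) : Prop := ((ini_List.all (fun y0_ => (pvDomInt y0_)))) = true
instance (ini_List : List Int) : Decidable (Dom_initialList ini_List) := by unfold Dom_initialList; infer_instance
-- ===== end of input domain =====

-- B replaces A's single-pass 9-branch dispatch into a mutable histogram by nine per-bin list.count scans (idiomatic; same result, 9 passes instead of 1).

-- ===== PORT A =====
-- one loop step of A's if/elif chain; fishList[k] += 1 is fl.set k (fl.getD k 0 + 1)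
def initialListStep (fl : List Int) (item : Int) : List Int :=
  if item == 0 then fl.set 0 (fl.getD 0 0 + 1)
  else if item == 1 then fl.set 1 (fl.getD 1 0 + 1)
  else if item == 2 then fl.set 2 (fl.getD 2 0 + 1)
  else if item == 3 then fl.set 3 (fl.getD 3 0 + 1)
  else if item == 4 then fl.set 4 (fl.getD 4 0 + 1)
  else if item == 5 then fl.set 5 (fl.getD 5 0 + 1)
  else if item == 6 then fl.set 6 (fl.getD 6 0 + 1)
  else if item == 7 then fl.set 7 (fl.getD 7 0 + 1)
  else if item == 8 then fl.set 8 (fl.getD 8 0 + 1)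
  else fl

def initialList (ini_List : List Int) : List Int :=
  ini_List.foldl initialListStep [0,0,0,0,0,0,0,0,0]

-- ===== PORT B =====
-- [ini_List.count(i) for i in range(9)]; list.count → PySem.List.count
def initialList_alt (ini_List : List Int) : List Int :=
  (PySem.List.pyRange 0 9 1).map (fun i => PySem.List.count ini_List i)

-- ===== PRECONDITION & SPEC =====
def Spec_initialList (ini_List : List Int) (out : List Int) : Prop := out = initialList_alt ini_List
instance (ini_List : List Int) (out : List Int) : Decidable (Spec_initialList ini_List out) := by unfold Spec_initialList; infer_instance

-- ===== CLAIM (what is proved, stated in full; the proofs are below) =====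
def Claim_equal_initialList : Prop := ∀ (ini_List : List Int), Dom_initialList ini_List → Spec_initialList ini_List (initialList ini_List)

-- ===== LEMMAS AND PROOFS =====

lemma initialList_fold_counts (xs : List Int) :
    ∀ (a b c d e f g h i : Int),
      xs.foldl initialListStep [a,b,c,d,e,f,g,h,i] =
        [a + (xs.count 0 : Int), b + (xs.count 1 : Int), c + (xs.count 2 : Int),
         d + (xs.count 3 : Int), e + (xs.count 4 : Int), f + (xs.count 5 : Int),
         g + (xs.count 6 : Int), h + (xs.count 7 : Int), i + (xs.count 8 : Int)] := by
  induction xs with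
  | nil => intro a b c d e f g h i; simp
  | cons x t ih =>
    intro a b c d e f g h i
    simp only [List.foldl_cons, initialListStep]
    split_ifs with h0 h1 h2 h3 h4 h5 h6 h7 h8 <;>
      simp_all [List.count_cons, ih] <;> omega

lemma initialList_eq_counts (xs : List Int) :
    initialList xs =
      [(xs.count 0 : Int), (xs.count 1 : Int), (xs.count 2 : Int),
       (xs.count 3 : Int), (xs.count 4 : Int), (xs.count 5 : Int),
       (xs.count 6 : Int), (xs.count 7 : Int), (xs.count 8 : Int)] := by
  have := initialList_fold_counts xs 0 0 0 0 0 0 0 0 0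
  simpa [initialList] using this

lemma initialList_alt_eq_counts (xs : List Int) :
    initialList_alt xs =
      [(xs.count 0 : Int), (xs.count 1 : Int), (xs.count 2 : Int),
       (xs.count 3 : Int), (xs.count 4 : Int), (xs.count 5 : Int),
       (xs.count 6 : Int), (xs.count 7 : Int), (xs.count 8 : Int)] := by
  have hr : PySem.List.pyRange 0 9 1 = [0,1,2,3,4,5,6,7,8] := by decide
  simp [initialList_alt, hr, PySem.List.count]

-- ===== VERDICT (by name: the statement is the Claim_ definition above) =====
theorem initialList_spec : Claim_equal_initialList := by
  intro xs _
  unfold Spec_initialList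
  rw [initialList_eq_counts, initialList_alt_eq_counts]
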